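-- pv_equiv track=rewrite | github.com/baesh3744/algorithm-solutions | baekjoon/01000/1309.py | place_lions
-- ===== SOURCE A (Python) =====
-- from typing import Final, List
--
-- MOD: Final[int] = 9901
--
-- def place_lions(N: int) -> int:
--     lions: List[List[int]] = [[1, 0, 0], [1, 1, 1]]
--
--     for len in range(2, N + 1):
--         pre_idx: int = (len - 1) % 2
--         cur_idx: int = len % 2
--
--         lions[cur_idx][0] = (sum(lions[pre_idx])) % MOD
--         lions[cur_idx][1] = (lions[pre_idx][0] + lions[pre_idx][2]) % MOD
--         lions[cur_idx][2] = (lions[pre_idx][0] + lions[pre_idx][1]) % MOD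
--     return sum(lions[N % 2]) % MOD
-- ===== SOURCE B (Python) =====
-- MOD = 9901
--
--
-- def place_lions(N: int) -> int:
--     # T(n) = 2*T(n-1) + T(n-2), T(0)=1, T(1)=3; computed by 2x2 matrix
--     # exponentiation by squaring, O(log N) instead of A's O(N) loop.
--     if N <= 0:
--         return 1  # no columns: the single empty placement
--     m = (2, 1, 1, 0)
--     r = (1, 0, 0, 1)
--     k = N
--     while k > 0:
--         if k % 2 == 1:
--             r = _mul(r, m)
--         m = _mul(m, m)
--         k //= 2
--     # (M^N) applied to (T(1), T(0)) has second row r[2]*3 + r[3]*1 = T(N)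
--     return (r[2] * 3 + r[3] * 1) % MOD
--
--
-- def _mul(x, y):
--     a, b, c, d = x
--     e, f, g, h = y
--     return ((a * e + b * g) % MOD, (a * f + b * h) % MOD,
--             (c * e + d * g) % MOD, (c * f + d * h) % MOD)
-- ===== Notes on version B (the rewrite author's own statement) =====
-- stated objective: faster
-- what changed: Replaces the O(N) three-state DP loop by exponentiation-by-squaring of the 2x2 companion matrix of the recurrence T(n)=2T(n-1)+T(n-2) mod 9901, O(log N).
-- intended difference: For negative odd N, A returns 3 (an artifact of indexing the initial table with N % 2); B returns 1, the single empty placement, the intended value for a degenerate grid with no columns. — e.g. on place_lions(-1): A returns 3, B returns 1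
import Mathlib
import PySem

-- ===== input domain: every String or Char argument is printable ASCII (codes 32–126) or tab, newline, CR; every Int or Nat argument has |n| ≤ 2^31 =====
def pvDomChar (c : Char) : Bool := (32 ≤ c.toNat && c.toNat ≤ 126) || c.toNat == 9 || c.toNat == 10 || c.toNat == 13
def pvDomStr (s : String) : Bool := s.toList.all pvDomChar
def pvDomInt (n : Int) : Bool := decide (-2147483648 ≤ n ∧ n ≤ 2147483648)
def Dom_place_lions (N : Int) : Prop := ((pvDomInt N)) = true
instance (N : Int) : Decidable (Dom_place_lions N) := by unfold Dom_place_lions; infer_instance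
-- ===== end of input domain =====

-- B replaces A's O(N) three-state DP loop by exponentiation by squaring of the
-- 2x2 companion matrix of T(n) = 2*T(n-1) + T(n-2) mod 9901 (O(log N)).

-- ===== PORT A =====
def pvStep (l : (Int × Int × Int) × (Int × Int × Int)) (len : Int) :
    (Int × Int × Int) × (Int × Int × Int) :=
  let pre := if (len - 1) % 2 = 0 then l.1 else l.2
  let cur : Int × Int × Int :=
    ((pre.1 + pre.2.1 + pre.2.2) % 9901, (pre.1 + pre.2.2) % 9901, (pre.1 + pre.2.1) % 9901)
  if len % 2 = 0 then (cur, l.2) else (l.1, cur)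

def place_lions (N : Int) : Int :=
  let lions := (PySem.List.pyRange 2 (N + 1) 1).foldl pvStep ((1, 0, 0), (1, 1, 1))
  let row := if N % 2 = 0 then lions.1 else lions.2
  (row.1 + row.2.1 + row.2.2) % 9901

-- ===== PORT B =====
def pvMul (x y : Int × Int × Int × Int) : Int × Int × Int × Int :=
  ((x.1 * y.1 + x.2.1 * y.2.2.1) % 9901, (x.1 * y.2.1 + x.2.1 * y.2.2.2) % 9901,
   (x.2.2.1 * y.1 + x.2.2.2 * y.2.2.1) % 9901, (x.2.2.1 * y.2.1 + x.2.2.2 * y.2.2.2) % 9901)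

def pvPowLoop (k : Nat) (m r : Int × Int × Int × Int) : Int × Int × Int × Int :=
  if k = 0 then r
  else pvPowLoop (k / 2) (pvMul m m) (if k % 2 = 1 then pvMul r m else r)
termination_by k
decreasing_by exact Nat.div_lt_self (Nat.pos_of_ne_zero (by assumption)) (by norm_num)

def place_lions_alt (N : Int) : Int :=
  if N ≤ 0 then 1
  else
    let r := pvPowLoop N.toNat (2, 1, 1, 0) (1, 0, 0, 1)
    (r.2.2.1 * 3 + r.2.2.2 * 1) % 9901

-- ===== PRECONDITION & SPEC =====
-- For negative odd N, A returns 3 (an artifact of indexing the initial table with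
-- N % 2); B returns 1, the single empty placement, the intended value for a
-- degenerate grid with no columns.
def D_place_lions (N : Int) : Prop := N < 0 ∧ N % 2 = 1
instance (N : Int) : Decidable (D_place_lions N) := by unfold D_place_lions; infer_instance

def Spec_place_lions (N : Int) (out : Int) : Prop := ¬ D_place_lions N → out = place_lions_alt N
instance (N : Int) (out : Int) : Decidable (Spec_place_lions N out) := by
  unfold Spec_place_lions; infer_instance

def pvDiffWitness_place_lions : Int := (-1)
def pvDiffWitnessOut_place_lions : Int × Int := (3, 1)

-- ===== CLAIM (what is proved, stated in full; the proofs are below) =====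
def Claim_unchanged_place_lions : Prop :=
  ∀ (N : Int), Dom_place_lions N → Spec_place_lions N (place_lions N)
def Claim_changed_place_lions : Prop :=
  Dom_place_lions (pvDiffWitness_place_lions) ∧ D_place_lions (pvDiffWitness_place_lions) ∧
  place_lions (pvDiffWitness_place_lions) = pvDiffWitnessOut_place_lions.1 ∧
  place_lions_alt (pvDiffWitness_place_lions) = pvDiffWitnessOut_place_lions.2 ∧
  pvDiffWitnessOut_place_lions.1 ≠ pvDiffWitnessOut_place_lions.2
def Claim_exact_place_lions : Prop :=
  ∀ (N : Int), Dom_place_lions N → D_place_lions N → place_lions N ≠ place_lions_alt N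

-- ===== LEMMAS AND PROOFS =====

-- cast Int mod 9901 into ZMod 9901
lemma pvCastMod (a : Int) : ((a % 9901 : Int) : ZMod 9901) = (a : ZMod 9901) := by
  have h := ZMod.intCast_mod a 9901
  norm_num at h
  exact h

def pvCzM (x : Int × Int × Int × Int) : Matrix (Fin 2) (Fin 2) (ZMod 9901) :=
  !![(x.1 : ZMod 9901), (x.2.1 : ZMod 9901); (x.2.2.1 : ZMod 9901), (x.2.2.2 : ZMod 9901)]

def pvMz : Matrix (Fin 2) (Fin 2) (ZMod 9901) := !![2, 1; 1, 0]

lemma pvCzM_mul (x y : Int × Int × Int × Int) : pvCzM (pvMul x y) = pvCzM x * pvCzM y := by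
  obtain ⟨a, b, c, d⟩ := x
  obtain ⟨e, f, g, h⟩ := y
  simp [pvMul, pvCzM, pvCastMod]

lemma pvPowLoop_cast : ∀ (k : Nat) (m r : Int × Int × Int × Int),
    pvCzM (pvPowLoop k m r) = pvCzM r * (pvCzM m) ^ k := by
  intro k
  induction k using Nat.strong_induction_on with
  | _ k ih =>
    intro m r
    rw [pvPowLoop]
    by_cases hk : k = 0
    · simp [hk]
    · rw [if_neg hk, ih (k / 2) (Nat.div_lt_self (Nat.pos_of_ne_zero hk) (by norm_num))]
      rw [pvCzM_mul]
      have hsq : (pvCzM m * pvCzM m) ^ (k / 2) = pvCzM m ^ (2 * (k / 2)) := by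
        rw [pow_mul, sq]
      by_cases hp : k % 2 = 1
      · rw [if_pos hp, pvCzM_mul, hsq, mul_assoc]
        congr 1
        rw [← pow_succ']
        congr 1
        omega
      · rw [if_neg hp, hsq]
        congr 1
        congr 1
        omega

-- the DP in ZMod 9901
def pvAbc : Nat → (ZMod 9901 × ZMod 9901 × ZMod 9901)
  | 0 => (1, 0, 0)
  | n + 1 =>
    ((pvAbc n).1 + (pvAbc n).2.1 + (pvAbc n).2.2,
     (pvAbc n).1 + (pvAbc n).2.2,
     (pvAbc n).1 + (pvAbc n).2.1)

def pvS (n : Nat) : ZMod 9901 := (pvAbc n).1 + (pvAbc n).2.1 + (pvAbc n).2.2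

lemma pvS_rec (n : Nat) : pvS (n + 2) = 2 * pvS (n + 1) + pvS n := by
  simp [pvS, pvAbc]
  ring

lemma pvMz_pow_entries : ∀ n : Nat,
    (pvMz ^ n) 1 0 * 3 + (pvMz ^ n) 1 1 = pvS n ∧
    (pvMz ^ n) 0 0 * 3 + (pvMz ^ n) 0 1 = pvS (n + 1) := by
  intro n
  induction n with
  | zero =>
    refine ⟨by simp [pvS, pvAbc], by simp [pvS, pvAbc]; norm_num⟩
  | succ n ih =>
    have hmul : pvMz ^ (n + 1) = pvMz * pvMz ^ n := by rw [pow_succ']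
    have h00 : (pvMz * pvMz ^ n) 0 0 = 2 * (pvMz ^ n) 0 0 + (pvMz ^ n) 1 0 := by
      simp [pvMz, Matrix.mul_apply, Fin.sum_univ_two]
    have h01 : (pvMz * pvMz ^ n) 0 1 = 2 * (pvMz ^ n) 0 1 + (pvMz ^ n) 1 1 := by
      simp [pvMz, Matrix.mul_apply, Fin.sum_univ_two]
    have h10 : (pvMz * pvMz ^ n) 1 0 = (pvMz ^ n) 0 0 := by
      simp [pvMz, Matrix.mul_apply, Fin.sum_univ_two]
    have h11 : (pvMz * pvMz ^ n) 1 1 = (pvMz ^ n) 0 1 := by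
      simp [pvMz, Matrix.mul_apply, Fin.sum_univ_two]
    refine ⟨?_, ?_⟩
    · rw [hmul, h10, h11]; exact ih.2
    · rw [hmul, h00, h01, pvS_rec]
      rw [← ih.1, ← ih.2]
      ring

-- cast of a DP row
def pvCz3 (r : Int × Int × Int) : ZMod 9901 × ZMod 9901 × ZMod 9901 :=
  ((r.1 : ZMod 9901), (r.2.1 : ZMod 9901), (r.2.2 : ZMod 9901))

lemma pvCz3_cur (pre : Int × Int × Int) :
    pvCz3 ((pre.1 + pre.2.1 + pre.2.2) % 9901, (pre.1 + pre.2.2) % 9901,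
      (pre.1 + pre.2.1) % 9901) =
    ((pvCz3 pre).1 + (pvCz3 pre).2.1 + (pvCz3 pre).2.2,
     (pvCz3 pre).1 + (pvCz3 pre).2.2,
     (pvCz3 pre).1 + (pvCz3 pre).2.1) := by
  obtain ⟨a, b, c⟩ := pre
  simp [pvCz3, pvCastMod]

-- A's loop invariant: after folding range(2, n+1) the two rows hold pvAbc n and pvAbc (n-1)
lemma pvA_inv : ∀ n : Nat, 1 ≤ n →
    pvCz3 (if n % 2 = 0
      then ((PySem.List.pyRange 2 ((n : Int) + 1) 1).foldl pvStep ((1, 0, 0), (1, 1, 1))).1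
      else ((PySem.List.pyRange 2 ((n : Int) + 1) 1).foldl pvStep ((1, 0, 0), (1, 1, 1))).2)
      = pvAbc n ∧
    pvCz3 (if n % 2 = 0
      then ((PySem.List.pyRange 2 ((n : Int) + 1) 1).foldl pvStep ((1, 0, 0), (1, 1, 1))).2
      else ((PySem.List.pyRange 2 ((n : Int) + 1) 1).foldl pvStep ((1, 0, 0), (1, 1, 1))).1)
      = pvAbc (n - 1) := by
  intro n
  induction n with
  | zero => omega
  | succ n ih =>
    intro _
    by_cases hn : n = 0
    · subst hn
      rw [PySem.List.pyRange_one_eq_nil (by norm_num)]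
      refine ⟨?_, ?_⟩ <;> simp [pvCz3, pvAbc]
    · have hn1 : 1 ≤ n := Nat.pos_of_ne_zero hn
      have ⟨ih1, ih2⟩ := ih hn1
      have hsplit : PySem.List.pyRange 2 (((n + 1 : Nat) : Int) + 1) 1 =
          PySem.List.pyRange 2 ((n : Int) + 1) 1 ++ [(n : Int) + 1] := by
        have h2 : ((n + 1 : Nat) : Int) + 1 = ((n : Int) + 1) + 1 := by push_cast; ring
        rw [h2, PySem.List.pyRange_one_succ_right (by omega)]
      rw [hsplit, List.foldl_append]
      set st := (PySem.List.pyRange 2 ((n : Int) + 1) 1).foldl pvStep ((1, 0, 0), (1, 1, 1)) with hst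
      simp only [List.foldl_cons, List.foldl_nil]
      by_cases hpar : n % 2 = 0
      · have hodd : (n + 1) % 2 ≠ 0 := by omega
        have e1 : ((n : Int) + 1 - 1) % 2 = 0 := by omega
        have e2 : ¬((n : Int) + 1) % 2 = 0 := by omega
        rw [if_pos hpar] at ih1
        have hstep : pvStep st ((n : Int) + 1) =
            (st.1, ((st.1.1 + st.1.2.1 + st.1.2.2) % 9901, (st.1.1 + st.1.2.2) % 9901,
              (st.1.1 + st.1.2.1) % 9901)) := by
          unfold pvStep
          rw [if_pos e1, if_neg e2]
        rw [hstep, if_neg hodd, if_neg hodd]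
        refine ⟨?_, ?_⟩
        · rw [pvCz3_cur, ih1]
          simp [pvAbc]
        · simpa using ih1
      · have heven : (n + 1) % 2 = 0 := by omega
        have o1 : ¬((n : Int) + 1 - 1) % 2 = 0 := by omega
        have o2 : ((n : Int) + 1) % 2 = 0 := by omega
        rw [if_neg hpar] at ih1
        have hstep : pvStep st ((n : Int) + 1) =
            (((st.2.1 + st.2.2.1 + st.2.2.2) % 9901, (st.2.1 + st.2.2.2) % 9901,
              (st.2.1 + st.2.2.1) % 9901), st.2) := by
          unfold pvStep
          rw [if_neg o1, if_pos o2]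
        rw [hstep, if_pos heven, if_pos heven]
        refine ⟨?_, ?_⟩
        · rw [pvCz3_cur, ih1]
          simp [pvAbc]
        · simpa using ih1

lemma pvInt_eq_of_cast (x y : Int) (hx0 : 0 ≤ x) (hx1 : x < 9901) (hy0 : 0 ≤ y)
    (hy1 : y < 9901) (h : (x : ZMod 9901) = (y : ZMod 9901)) : x = y := by
  rw [ZMod.intCast_eq_intCast_iff'] at h
  norm_num at h
  omega

lemma pvFinal (X : Int × Int × Int) (r : Int × Int × Int × Int) (n : Nat)
    (hX : pvCz3 X = pvAbc n) (h10 : ((r.2.2.1 : Int) : ZMod 9901) = (pvMz ^ n) 1 0)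
    (h11 : ((r.2.2.2 : Int) : ZMod 9901) = (pvMz ^ n) 1 1) :
    ((X.1 + X.2.1 + X.2.2 : Int) : ZMod 9901) =
      ((r.2.2.1 * 3 + r.2.2.2 * 1 : Int) : ZMod 9901) := by
  obtain ⟨a, b, c⟩ := X
  simp [pvCz3, Prod.ext_iff] at hX
  push_cast
  rw [hX.1, hX.2.1, hX.2.2, mul_one, h10, h11, (pvMz_pow_entries n).1]
  rfl

-- ===== VERDICT (by name: the statement is the Claim_ definition above) =====
theorem place_lions_spec : Claim_unchanged_place_lions := by
  intro N _ hD
  unfold place_lions place_lions_alt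
  by_cases hN : N ≤ 0
  · have hempty : PySem.List.pyRange 2 (N + 1) 1 = [] :=
      PySem.List.pyRange_one_eq_nil (by omega)
    have hpar : N % 2 = 0 := by
      rcases lt_or_eq_of_le hN with h | h
      · by_contra hne
        exact hD ⟨h, by omega⟩
      · omega
    rw [hempty, if_pos hN]
    simp [hpar]
  · have hN' : 0 < N := by omega
    rw [if_neg (by omega)]
    clear hN
    set n := N.toNat with hn
    have hNn : N = (n : Int) := by omega
    have hn1 : 1 ≤ n := by omega
    have ⟨hA, _⟩ := pvA_inv n hn1
    set r := pvPowLoop n (2, 1, 1, 0) (1, 0, 0, 1) with hr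
    have hrcast : pvCzM r = pvMz ^ n := by
      rw [hr, pvPowLoop_cast]
      have h1 : pvCzM (1, 0, 0, 1) = (1 : Matrix (Fin 2) (Fin 2) (ZMod 9901)) := by
        rw [Matrix.one_fin_two]; simp [pvCzM]
      have h2 : pvCzM (2, 1, 1, 0) = pvMz := by simp [pvCzM, pvMz]
      rw [h1, h2, one_mul]
    have h10 : ((r.2.2.1 : Int) : ZMod 9901) = (pvMz ^ n) 1 0 := by
      rw [← hrcast]; simp [pvCzM]
    have h11 : ((r.2.2.2 : Int) : ZMod 9901) = (pvMz ^ n) 1 1 := by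
      rw [← hrcast]; simp [pvCzM]
    apply pvInt_eq_of_cast
    · exact Int.emod_nonneg _ (by norm_num)
    · exact Int.emod_lt_of_pos _ (by norm_num)
    · exact Int.emod_nonneg _ (by norm_num)
    · exact Int.emod_lt_of_pos _ (by norm_num)
    · rw [hNn, pvCastMod, pvCastMod]
      by_cases hp : n % 2 = 0
      · rw [if_pos hp] at hA
        rw [if_pos (show ((n : Int)) % 2 = 0 by omega)]
        exact pvFinal _ _ n hA h10 h11
      · rw [if_neg hp] at hA
        rw [if_neg (show ¬((n : Int)) % 2 = 0 by omega)]
        exact pvFinal _ _ n hA h10 h11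

theorem place_lions_changed : Claim_changed_place_lions := by
  unfold Claim_changed_place_lions; decide

theorem place_lions_tight : Claim_exact_place_lions := by
  intro N _ hD
  obtain ⟨hneg, hodd⟩ := hD
  unfold place_lions place_lions_alt
  rw [PySem.List.pyRange_one_eq_nil (by omega)]
  have h1 : ¬N % 2 = 0 := by omega
  have h2 : N ≤ 0 := by omega
  simp [h1, h2]
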